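-- pv_equiv track=rewrite | github.com/JakubTom1/Multicriterial_Optimalization | Lab2/main.py | ideal_point_algorithm
-- ===== SOURCE A (Python) =====
-- def find_ideal_point(points):
--     if not points:
--         return None
--     dim = len(points[0])
--     ideal_point = []
--     for d in range(dim):
--         ideal_point.append(min(point[d] for point in points))
--     return tuple(ideal_point)
--
-- def calculate_distance(point, ideal_point):
--     return sum((p - i) ** 2 for p, i in zip(point, ideal_point))
--
-- def ideal_point_algorithm(points):
--     if not points:
--         return []
--
--     ideal_point = find_ideal_point(points)
--     points_with_distances = [(point, calculate_distance(point, ideal_point)) for point in points]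
--     sorted_points = sorted(points_with_distances, key=lambda x: x[1])
--
--     pareto_front = []
--     for point, _ in sorted_points:
--         dominated = False
--         for p in pareto_front:
--             if all(x <= y for x, y in zip(p, point)) and any(x < y for x, y in zip(p, point)):
--                 dominated = True
--                 break
--         if not dominated:
--             pareto_front.append(point)
--
--     return pareto_front
-- ===== SOURCE B (Python) =====
-- def ideal_point_algorithm(points):
--     if not points:
--         return []
--     ideal = [min(p[d] for p in points) for d in range(len(points[0]))]
--
--     def dominates(q, p):
--         return all(x <= y for x, y in zip(q, p)) and any(x < y for x, y in zip(q, p))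
--
--     rest = sorted(points, key=lambda p: sum((x - i) ** 2 for x, i in zip(p, ideal)))
--     front = []
--     while rest:
--         p = rest[0]
--         rest = [q for q in rest[1:] if not dominates(p, q)]
--         front.append(p)
--     return front
-- ===== Notes on version B (the rewrite author's own statement) =====
-- stated objective: alternative
-- what changed: B sorts the points themselves by squared distance to the ideal point and then builds the front as a pruning sieve - each accepted point immediately filters all points it dominates out of the remaining pool - instead of A's pair-list sort followed by a per-candidate scan over the growing front.
import Mathlib
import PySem

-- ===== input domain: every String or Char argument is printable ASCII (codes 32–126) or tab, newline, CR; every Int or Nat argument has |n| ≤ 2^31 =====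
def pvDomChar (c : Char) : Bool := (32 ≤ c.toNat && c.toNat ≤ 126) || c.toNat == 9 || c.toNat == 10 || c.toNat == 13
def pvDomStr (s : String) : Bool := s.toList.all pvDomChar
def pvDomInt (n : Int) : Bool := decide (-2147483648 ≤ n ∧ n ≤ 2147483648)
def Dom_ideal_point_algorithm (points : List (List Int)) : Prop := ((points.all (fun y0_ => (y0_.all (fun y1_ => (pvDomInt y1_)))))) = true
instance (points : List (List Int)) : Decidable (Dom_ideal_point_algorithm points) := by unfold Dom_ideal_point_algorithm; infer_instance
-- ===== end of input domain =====

-- B replaces A's pair-list sort + per-candidate scan over the growing front by a sort of the points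
-- themselves followed by a pruning sieve over the remaining pool (alternative decomposition).

-- ===== PORT A =====

-- inner domination test of A's loop ('all(x <= y ...) and any(x < y ...)', zip truncating)
def dominatesA (q p : List Int) : Bool :=
  ((q.zip p).all (fun xy => xy.1 ≤ xy.2)) && ((q.zip p).any (fun xy => xy.1 < xy.2))

-- find_ideal_point; under Pre_ the pyGetD/getD defaults are unreachable (Python raises IndexError
-- outside Pre_; min of a nonempty generator, so min? is some)
def find_ideal_point (points : List (List Int)) : Option (List Int) :=
  if points = [] then none
  else
    some ((PySem.List.pyRange 0 (points.headI.length : Int)).map (fun d =>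
      (PySem.List.min? (points.map (fun p => PySem.List.pyGetD p d 0)) (fun x => x)).getD 0))

def calculate_distance (point ideal : List Int) : Int :=
  ((point.zip ideal).map (fun pi => (pi.1 - pi.2) ^ 2)).sum

def ideal_point_algorithm (points : List (List Int)) : List (List Int) :=
  if points = [] then []
  else
    let ideal := (find_ideal_point points).getD []  -- never none here (points ≠ [])
    let points_with_distances := points.map (fun p => (p, calculate_distance p ideal))
    let sorted_points := PySem.List.sorted points_with_distances (fun x => x.2) false
    sorted_points.foldl (fun front pd =>
      if front.any (fun q => dominatesA q pd.1) then front else front ++ [pd.1]) []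

-- ===== PORT B =====

def dominatesB (q p : List Int) : Bool :=
  ((q.zip p).all (fun xy => xy.1 ≤ xy.2)) && ((q.zip p).any (fun xy => xy.1 < xy.2))

-- [min(p[d] for p in points) for d in range(len(points[0]))]; under Pre_ every p[d] is in
-- range, so the pyGetD/getD defaults are unreachable (Python raises IndexError outside Pre_)
def pvIdeal (points : List (List Int)) : List Int :=
  (PySem.List.pyRange 0 (points.headI.length : Int)).map (fun d =>
    (PySem.List.min? (points.map (fun p => PySem.List.pyGetD p d 0)) (fun x => x)).getD 0)

def pvDist (point ideal : List Int) : Int :=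
  ((point.zip ideal).map (fun xi => (xi.1 - xi.2) ^ 2)).sum

-- the 'while rest:' loop of B: accept the head, prune everything it dominates from the pool
-- (fuel = the pool's length, a pure totality guard: pruning never grows the pool, so it never runs out)
def pvSieveGo (fuel : Nat) (front : List (List Int)) (rest : List (List Int)) : List (List Int) :=
  match fuel, rest with
  | _, [] => front
  | 0, _ => front
  | fuel + 1, p :: rest' => pvSieveGo fuel (front ++ [p]) (rest'.filter (fun q => !(dominatesB p q)))

def ideal_point_algorithm_alt (points : List (List Int)) : List (List Int) :=
  if points = [] then []
  else
    let ideal := pvIdeal points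
    let rest := PySem.List.sorted points (fun p => pvDist p ideal) false
    pvSieveGo rest.length [] rest

-- ===== PRECONDITION & SPEC =====

-- Pre_ is exactly the set of inputs on which the Python A returns normally: A (and B alike) raises
-- IndexError as soon as some row is shorter than the first row (indexing point[d] for d < len(points[0])).
def Pre_ideal_point_algorithm (points : List (List Int)) : Prop :=
  ∀ p ∈ points, points.headI.length ≤ p.length

instance (points : List (List Int)) : Decidable (Pre_ideal_point_algorithm points) := by
  unfold Pre_ideal_point_algorithm; infer_instance

def pvWitness_ideal_point_algorithm : List (List Int) := [[0, 1], [1, 0]]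

def Spec_ideal_point_algorithm (points : List (List Int)) (out : List (List Int)) : Prop :=
  out = ideal_point_algorithm_alt points
instance (points : List (List Int)) (out : List (List Int)) : Decidable (Spec_ideal_point_algorithm points out) := by
  unfold Spec_ideal_point_algorithm; infer_instance

-- ===== CLAIM (what is proved, stated in full; the proofs are below) =====
def Claim_equal_ideal_point_algorithm : Prop := ∀ (points : List (List Int)), Dom_ideal_point_algorithm points → Pre_ideal_point_algorithm points → Spec_ideal_point_algorithm points (ideal_point_algorithm points)

-- ===== LEMMAS AND PROOFS =====

-- stable-sort naturality: sorting a mapped list on a key of the image is mapping the sort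
theorem pv_insertBy_map {α β : Type} (g : α → β) (bef : β → β → Bool) (x : α) (acc : List α) :
    PySem.List.insertBy bef (g x) (acc.map g)
      = (PySem.List.insertBy (fun a b => bef (g a) (g b)) x acc).map g := by
  induction acc with
  | nil => simp [PySem.List.insertBy]
  | cons y ys ih =>
    simp only [List.map_cons, PySem.List.insertBy]
    by_cases h : bef (g x) (g y)
    · simp [h]
    · simp [h, ih]

theorem pv_foldl_insertBy_map {α β : Type} (g : α → β) (bef : β → β → Bool) :
    ∀ (xs : List α) (acc : List α),
      List.foldl (fun a x => PySem.List.insertBy bef (g x) a) (acc.map g) xs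
        = (List.foldl (fun a x => PySem.List.insertBy (fun a b => bef (g a) (g b)) x a) acc xs).map g := by
  intro xs
  induction xs with
  | nil => intro acc; rfl
  | cons x xs ih =>
    intro acc
    simp only [List.foldl_cons]
    rw [pv_insertBy_map, ih]

theorem pv_sorted_map {α β κ : Type} [LT κ] [DecidableLT κ] (g : α → β) (k : β → κ) (xs : List α) :
    PySem.List.sorted (xs.map g) k false
      = (PySem.List.sorted xs (fun x => k (g x)) false).map g := by
  rw [PySem.List.sorted_eq_foldl_insertBy, PySem.List.sorted_eq_foldl_insertBy, List.foldl_map]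
  have := pv_foldl_insertBy_map g (fun a b => decide (k a < k b)) xs []
  simpa using this

-- A's front-scanning fold over the sorted list is B's sieve: a point is accepted exactly when no
-- already-accepted point dominates it, which is exactly survival of all pruning passes so far
theorem pv_sieve_eq : ∀ (S F : List (List Int)) (fuel : Nat),
    (S.filter (fun p => !(F.any (fun q => dominatesB q p)))).length ≤ fuel →
    S.foldl (fun front p => if front.any (fun q => dominatesB q p) then front else front ++ [p]) F
      = pvSieveGo fuel F (S.filter (fun p => !(F.any (fun q => dominatesB q p)))) := by
  intro S
  induction S with
  | nil => intro F fuel _; cases fuel <;> rfl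
  | cons p S' ih =>
    intro F fuel hfuel
    rw [List.foldl_cons, List.filter_cons]
    cases hF : F.any (fun q => dominatesB q p) with
    | true =>
      simp only [if_true, Bool.not_true, Bool.false_eq_true, if_false]
      rw [List.filter_cons, hF] at hfuel
      simp only [Bool.not_true, Bool.false_eq_true, if_false] at hfuel
      exact ih F fuel hfuel
    | false =>
      simp only [Bool.false_eq_true, if_false, Bool.not_false, if_true]
      rw [List.filter_cons, hF] at hfuel
      simp only [Bool.not_false, if_true, List.length_cons] at hfuel
      obtain ⟨g, rfl⟩ : ∃ g, fuel = g + 1 := ⟨fuel - 1, by omega⟩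
      rw [pvSieveGo]
      have hcomb : (S'.filter (fun r => !(F.any (fun q => dominatesB q r)))).filter
            (fun q => !(dominatesB p q))
          = S'.filter (fun r => !((F ++ [p]).any (fun q => dominatesB q r))) := by
        rw [List.filter_filter]
        apply List.filter_congr
        intro q _
        simp [List.any_append, Bool.and_comm]
      rw [hcomb]
      apply ih (F ++ [p]) g
      rw [← hcomb]
      exact le_trans (List.length_filter_le _ _) (by omega)

theorem pv_main : ∀ (points : List (List Int)), Pre_ideal_point_algorithm points →
    ideal_point_algorithm points = ideal_point_algorithm_alt points := by
  intro points _
  rcases points with _ | ⟨p0, rest⟩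
  · rfl
  have hne : p0 :: rest ≠ [] := List.cons_ne_nil p0 rest
  have hcol : pvIdeal (p0 :: rest) = (find_ideal_point (p0 :: rest)).getD [] := by
    simp [pvIdeal, find_ideal_point]
  have hCD : calculate_distance = pvDist := rfl
  rw [ideal_point_algorithm, if_neg hne]
  rw [ideal_point_algorithm_alt, if_neg hne]
  simp only [hcol, hCD]
  rw [pv_sorted_map (fun p => (p, pvDist p ((find_ideal_point (p0 :: rest)).getD []))) Prod.snd (p0 :: rest)]
  rw [List.foldl_map]
  have hAB : dominatesA = dominatesB := rfl
  simp only [hAB]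
  rw [pv_sieve_eq (PySem.List.sorted (p0 :: rest) (fun p => pvDist p ((find_ideal_point (p0 :: rest)).getD [])) false) []
    (PySem.List.sorted (p0 :: rest) (fun p => pvDist p ((find_ideal_point (p0 :: rest)).getD [])) false).length
    (le_trans (List.length_filter_le _ _) le_rfl)]
  simp

-- ===== VERDICT (by name: the statement is the Claim_ definition above) =====
theorem ideal_point_algorithm_spec : Claim_equal_ideal_point_algorithm := by
  intro points _ hpre
  exact pv_main points hpre
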